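-- pv_equiv track=rewrite | github.com/pjv-stack/synapse-system-pro | .synapse/agents/rust-specialist/tools/rust_analysis_tools.py | _generate_clippy_fixes
-- ===== SOURCE A (Python) =====
-- from typing import Dict, Any, List, Optional
--
-- def _generate_clippy_fixes(warnings: List[str], file_path: str) -> List[Dict[str, Any]]:
--     """Generate fix suggestions for Clippy warnings."""
--     fixes = []
--
--     for warning in warnings:
--         fix = {
--             "warning": warning,
--             "suggestion": "",
--             "confidence": "medium"
--         }
--
--         if "unwrap()" in warning:
--             fix["suggestion"] = "Replace .unwrap() with .expect(\"meaningful error message\")"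
--             fix["confidence"] = "high"
--         elif "clone()" in warning:
--             fix["suggestion"] = "Consider using references instead of cloning"
--             fix["confidence"] = "medium"
--         elif "boolean comparison" in warning:
--             fix["suggestion"] = "Remove redundant == true comparison"
--             fix["confidence"] = "high"
--         elif "with_capacity" in warning:
--             fix["suggestion"] = "Use Vec::with_capacity(n) when size is known"
--             fix["confidence"] = "medium"
--         else:
--             fix["suggestion"] = "Check Clippy documentation for this warning"
--             fix["confidence"] = "low"
--
--         fixes.append(fix)
--
--     return fixes
-- ===== SOURCE B (Python) =====
-- from typing import Dict, Any, List
--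
-- _RULES = [
--     ("unwrap()", "Replace .unwrap() with .expect(\"meaningful error message\")", "high"),
--     ("clone()", "Consider using references instead of cloning", "medium"),
--     ("boolean comparison", "Remove redundant == true comparison", "high"),
--     ("with_capacity", "Use Vec::with_capacity(n) when size is known", "medium"),
-- ]
--
--
-- def _generate_clippy_fixes(warnings: List[str], file_path: str) -> List[Dict[str, Any]]:
--     # Rule-major staged passes: one sweep over all warnings per rule,
--     # assigning only still-unassigned slots; a final pass fills defaults.
--     assigned = [(w, None) for w in warnings]
--     for pat, sugg, conf in _RULES:
--         assigned = [(w, sc if sc is not None else ((sugg, conf) if pat in w else None))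
--                     for w, sc in assigned]
--     out = []
--     for w, sc in assigned:
--         if sc is None:
--             sc = ("Check Clippy documentation for this warning", "low")
--         out.append({"warning": w, "suggestion": sc[0], "confidence": sc[1]})
--     return out
-- ===== Notes on version B (the rewrite author's own statement) =====
-- stated objective: alternative
-- what changed: Inverts the loop nesting: instead of A's warning-major if/elif chain deciding each warning's fix in one pass, B makes one staged sweep over the whole warning list per rule (rule-major), filling only still-unassigned slots, then a final pass fills defaults; equal because the rules are applied in the same priority order and an assigned slot is never overwritten.
import Mathlib
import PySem

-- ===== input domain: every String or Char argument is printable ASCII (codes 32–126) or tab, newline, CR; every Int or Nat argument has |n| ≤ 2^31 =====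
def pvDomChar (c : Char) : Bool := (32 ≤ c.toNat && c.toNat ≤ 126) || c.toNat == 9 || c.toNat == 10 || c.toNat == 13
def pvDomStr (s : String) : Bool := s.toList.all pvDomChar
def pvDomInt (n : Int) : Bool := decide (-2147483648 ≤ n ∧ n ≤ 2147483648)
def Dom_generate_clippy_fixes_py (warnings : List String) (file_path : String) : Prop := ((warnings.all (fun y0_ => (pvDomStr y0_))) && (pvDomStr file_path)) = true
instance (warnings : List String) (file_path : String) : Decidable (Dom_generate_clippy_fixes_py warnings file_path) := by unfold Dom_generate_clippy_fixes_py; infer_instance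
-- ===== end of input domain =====

-- B inverts the loop nesting: a staged sweep over all warnings per rule (rule-major) instead of A's per-warning if/elif chain; same cost, alternative structure.

-- ===== PORT A =====
-- literal transliteration: build the dict, overwrite "suggestion"/"confidence" per branch, append
def generate_clippy_fixes_py (warnings : List String) (file_path : String) : List (List (String × String)) :=
  (warnings.foldl (fun (fixes : List (PySem.Dict String String)) (warning : String) =>
    let fix : PySem.Dict String String :=
      PySem.Dict.ofList [("warning", warning), ("suggestion", ""), ("confidence", "medium")]
    let fix :=
      if PySem.Str.isIn "unwrap()" warning then
        (fix.insert "suggestion" "Replace .unwrap() with .expect(\"meaningful error message\")").insert "confidence" "high"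
      else if PySem.Str.isIn "clone()" warning then
        (fix.insert "suggestion" "Consider using references instead of cloning").insert "confidence" "medium"
      else if PySem.Str.isIn "boolean comparison" warning then
        (fix.insert "suggestion" "Remove redundant == true comparison").insert "confidence" "high"
      else if PySem.Str.isIn "with_capacity" warning then
        (fix.insert "suggestion" "Use Vec::with_capacity(n) when size is known").insert "confidence" "medium"
      else
        (fix.insert "suggestion" "Check Clippy documentation for this warning").insert "confidence" "low"
    fixes ++ [fix]) []).map (·.items)

-- ===== PORT B =====
def pvRules : List (String × String × String) :=
  [("unwrap()", "Replace .unwrap() with .expect(\"meaningful error message\")", "high"),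
   ("clone()", "Consider using references instead of cloning", "medium"),
   ("boolean comparison", "Remove redundant == true comparison", "high"),
   ("with_capacity", "Use Vec::with_capacity(n) when size is known", "medium")]

-- one rule-major sweep: assign the rule to each still-unassigned warning it matches
def pvSweep (r : String × String × String) (assigned : List (String × Option (String × String))) :
    List (String × Option (String × String)) :=
  assigned.map (fun p =>
    (p.1, match p.2 with
          | some v => some v
          | none => if PySem.Str.isIn r.1 p.1 then some (r.2.1, r.2.2) else none))

def generate_clippy_fixes_py_alt (warnings : List String) (file_path : String) : List (List (String × String)) :=
  let assigned := pvRules.foldl (fun acc r => pvSweep r acc) (warnings.map (fun w => (w, none)))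
  assigned.map (fun p =>
    let sc := match p.2 with
              | some v => v
              | none => ("Check Clippy documentation for this warning", "low")
    [("warning", p.1), ("suggestion", sc.1), ("confidence", sc.2)])

-- ===== PRECONDITION & SPEC =====
def Spec_generate_clippy_fixes_py (warnings : List String) (file_path : String) (out : List (List (String × String))) : Prop := out = generate_clippy_fixes_py_alt warnings file_path
instance (warnings : List String) (file_path : String) (out : List (List (String × String))) : Decidable (Spec_generate_clippy_fixes_py warnings file_path out) := by unfold Spec_generate_clippy_fixes_py; infer_instance

-- ===== CLAIM (what is proved, stated in full; the proofs are below) =====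
def Claim_equal_generate_clippy_fixes_py : Prop := ∀ (warnings : List String) (file_path : String), Dom_generate_clippy_fixes_py warnings file_path → Spec_generate_clippy_fixes_py warnings file_path (generate_clippy_fixes_py warnings file_path)

-- ===== LEMMAS AND PROOFS =====

-- per-element agreement, after unfolding B's four staged sweeps into one composed map
theorem pv_elem_eq (w : String) :
    (let fix : PySem.Dict String String :=
      PySem.Dict.ofList [("warning", w), ("suggestion", ""), ("confidence", "medium")]
     let fix :=
      if PySem.Str.isIn "unwrap()" w then
        (fix.insert "suggestion" "Replace .unwrap() with .expect(\"meaningful error message\")").insert "confidence" "high"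
      else if PySem.Str.isIn "clone()" w then
        (fix.insert "suggestion" "Consider using references instead of cloning").insert "confidence" "medium"
      else if PySem.Str.isIn "boolean comparison" w then
        (fix.insert "suggestion" "Remove redundant == true comparison").insert "confidence" "high"
      else if PySem.Str.isIn "with_capacity" w then
        (fix.insert "suggestion" "Use Vec::with_capacity(n) when size is known").insert "confidence" "medium"
      else
        (fix.insert "suggestion" "Check Clippy documentation for this warning").insert "confidence" "low"
     fix.items)
    = (let p := (List.foldl (fun acc r => pvSweep r acc) [(w, (none : Option (String × String)))] pvRules).headI
       let sc := match p.2 with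
                 | some v => v
                 | none => ("Check Clippy documentation for this warning", "low")
       [("warning", p.1), ("suggestion", sc.1), ("confidence", sc.2)]) := by
  simp only [pvRules, pvSweep, List.foldl, List.map]
  by_cases h1 : PySem.Str.isIn "unwrap()" w <;>
  by_cases h2 : PySem.Str.isIn "clone()" w <;>
  by_cases h3 : PySem.Str.isIn "boolean comparison" w <;>
  by_cases h4 : PySem.Str.isIn "with_capacity" w <;>
  simp at h1 h2 h3 h4 <;>
  simp [h1, h2, h3, h4, PySem.Dict.ofList, PySem.Dict.update, PySem.Dict.insert,
        PySem.Dict.contains, PySem.Dict.empty, List.foldl]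

-- fold of per-element maps commutes with cons: sweeping a list is element-wise
theorem pv_fold_sweep_cons (rs : List (String × String × String))
    (x : String × Option (String × String)) (xs : List (String × Option (String × String))) :
    List.foldl (fun acc r => pvSweep r acc) (x :: xs) rs
      = (List.foldl (fun acc r => pvSweep r acc) [x] rs).headI
        :: List.foldl (fun acc r => pvSweep r acc) xs rs := by
  induction rs generalizing x xs with
  | nil => rfl
  | cons r rs ih =>
    have h1 : pvSweep r (x :: xs) = (pvSweep r [x]).headI :: pvSweep r xs := rfl
    have h2 : [(pvSweep r [x]).headI] = pvSweep r [x] := rfl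
    rw [List.foldl_cons, h1, ih, h2]
    rfl

-- ===== VERDICT (by name: the statement is the Claim_ definition above) =====
theorem generate_clippy_fixes_py_spec : Claim_equal_generate_clippy_fixes_py := by
  intro warnings file_path hdom
  clear hdom
  unfold Spec_generate_clippy_fixes_py generate_clippy_fixes_py generate_clippy_fixes_py_alt
  rw [PySem.List.foldl_append_singleton_eq_map]
  simp only [List.nil_append, List.map_map]
  induction warnings with
  | nil => simp [pvRules, pvSweep]
  | cons w ws ih =>
    simp only [List.map]
    rw [pv_fold_sweep_cons]
    simp only [List.map]
    exact congrArg₂ _ (pv_elem_eq w) ih
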